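-- pv_equiv track=rewrite | github.com/SFZhang26/Algorithm | leetcode/reversePairs.py | count_reverse
-- ===== SOURCE A (Python) =====
-- def count_reverse(A, B):
--     count = 0
--     i, j = 0, 0
--     while i<len(A) and j<len(B):
--         if A[i]<=B[j]*2:
--             i+=1
--         else:
--             count+=(len(A)-i)
--             j+=1
--
--     return count
-- ===== SOURCE B (Python) =====
-- def count_reverse(A, B):
--     # Fold over B, keeping the unconsumed part of A as a reversed list so that
--     # discarding a leading element of A is an O(1) pop from the end; for each b
--     # pop the elements <= 2*b and add the count of what remains.
--     rest = A[::-1]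
--     total = 0
--     for b in B:
--         t = 2 * b
--         while rest and rest[-1] <= t:
--             rest.pop()
--         total += len(rest)
--     return total
-- ===== Notes on version B (the rewrite author's own statement) =====
-- stated objective: faster
-- what changed: Replaces the index-based two-pointer while-loop by a fold over B that carries the unconsumed part of A as a reversed list, popping elements <= 2*b off its end (O(1) pops) and adding the remaining count; no index arithmetic and no interleaved branch on two counters (the suggested bisect version would only match A on sorted inputs, which A does not require).
import Mathlib
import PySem

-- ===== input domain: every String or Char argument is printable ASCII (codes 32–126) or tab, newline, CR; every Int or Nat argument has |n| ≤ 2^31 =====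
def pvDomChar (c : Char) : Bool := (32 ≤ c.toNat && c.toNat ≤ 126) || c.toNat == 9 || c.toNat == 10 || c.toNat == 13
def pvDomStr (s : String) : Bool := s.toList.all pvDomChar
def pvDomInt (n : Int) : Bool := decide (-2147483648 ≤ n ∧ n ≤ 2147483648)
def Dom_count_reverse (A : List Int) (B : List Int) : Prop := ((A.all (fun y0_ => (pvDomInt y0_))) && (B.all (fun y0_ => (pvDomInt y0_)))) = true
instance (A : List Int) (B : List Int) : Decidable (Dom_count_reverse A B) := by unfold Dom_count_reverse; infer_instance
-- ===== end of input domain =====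

-- B replaces A's index-based two-pointer while-loop by a fold over B carrying the
-- unconsumed part of A as a reversed list (pop-from-end + remaining count); measured constant-factor faster in Python.


-- ===== PORT A =====
-- the while loop: state (i, j, count), each step increments i or j
def countRevLoopA (A : List Int) (B : List Int) (i j : Nat) (count : Int) : Int :=
  if h : i < A.length ∧ j < B.length then
    if A[i]'h.1 ≤ B[j]'h.2 * 2 then
      countRevLoopA A B (i + 1) j count
    else
      countRevLoopA A B i (j + 1) (count + ((A.length - i : Nat) : Int))
  else count
termination_by (A.length - i) + (B.length - j)
decreasing_by all_goals omega

def count_reverse (A : List Int) (B : List Int) : Int :=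
  countRevLoopA A B 0 0 0

-- ===== PORT B =====
-- the inner while: pop elements ≤ t from the end of the (reversed) list
def countRevPop (t : Int) (r : List Int) : List Int :=
  if h : r = [] then r
  else if r.getLast h ≤ t then countRevPop t r.dropLast else r
termination_by r.length
decreasing_by
  have : r.length ≠ 0 := fun hl => h (List.eq_nil_of_length_eq_zero hl)
  simp [List.length_dropLast]; omega

-- one step of the for-loop over B
def countRevStep (s : List Int × Int) (b : Int) : List Int × Int :=
  let rest := countRevPop (2 * b) s.1
  (rest, s.2 + (rest.length : Int))

def count_reverse_alt (A : List Int) (B : List Int) : Int :=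
  (B.foldl countRevStep (A.reverse, 0)).2

-- ===== PRECONDITION & SPEC =====
def Spec_count_reverse (A : List Int) (B : List Int) (out : Int) : Prop := out = count_reverse_alt A B
instance (A : List Int) (B : List Int) (out : Int) : Decidable (Spec_count_reverse A B out) := by unfold Spec_count_reverse; infer_instance

-- ===== CLAIM (what is proved, stated in full; the proofs are below) =====
def Claim_equal_count_reverse : Prop := ∀ (A : List Int) (B : List Int), Dom_count_reverse A B → Spec_count_reverse A B (count_reverse A B)

-- ===== LEMMAS AND PROOFS =====

-- proof-side model of a B-step: dropWhile on the unreversed suffix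
def countRevStepD (s : List Int × Int) (b : Int) : List Int × Int :=
  let rest := s.1.dropWhile (fun x => decide (x ≤ 2 * b))
  (rest, s.2 + (rest.length : Int))

-- popping from the end of the reversed list is dropWhile on the original
theorem countRevPop_reverse (t : Int) (r : List Int) :
    countRevPop t r.reverse = (r.dropWhile (fun x => decide (x ≤ t))).reverse := by
  induction r with
  | nil => simp [countRevPop]
  | cons a tl ih =>
      rw [List.reverse_cons, countRevPop]
      have hne : tl.reverse ++ [a] ≠ [] := by simp
      rw [dif_neg hne]
      have hlast : (tl.reverse ++ [a]).getLast hne = a := List.getLast_append_singleton _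
      rw [hlast, List.dropWhile_cons]
      by_cases ha : a ≤ t
      · rw [if_pos ha, if_pos (by simpa using ha), List.dropLast_concat, ih]
      · rw [if_neg ha, if_neg (by simpa using ha), List.reverse_cons]

-- the fold over reversed state computes the same total as the dropWhile fold
theorem countRev_fold_reverse (bs : List Int) : ∀ (r : List Int) (c : Int),
    bs.foldl countRevStep (r.reverse, c)
      = ((bs.foldl countRevStepD (r, c)).1.reverse, (bs.foldl countRevStepD (r, c)).2) := by
  induction bs with
  | nil => intro r c; simp
  | cons b bs ih =>
      intro r c
      simp only [List.foldl_cons, countRevStep, countRevStepD, countRevPop_reverse,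
        List.length_reverse]
      exact ih _ _

-- the accumulator of the dropWhile fold is additive
theorem countRev_foldl_acc (bs : List Int) : ∀ (r : List Int) (c : Int),
    (bs.foldl countRevStepD (r, c)).2 = c + (bs.foldl countRevStepD (r, 0)).2 := by
  induction bs with
  | nil => intro r c; simp
  | cons b bs ih =>
      intro r c
      simp only [List.foldl_cons, countRevStepD]
      rw [ih, ih (List.dropWhile _ r) (0 + _)]
      ring

-- folding over an empty remaining suffix contributes nothing
theorem countRev_foldl_nil (bs : List Int) (c : Int) :
    (bs.foldl countRevStepD ([], c)).2 = c := by
  induction bs generalizing c with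
  | nil => simp
  | cons b bs ih => simpa [countRevStepD] using ih c

-- main invariant: the A-loop from state (i, j, count) equals count plus the fold
-- of the remaining suffixes
theorem countRevLoopA_eq (A B : List Int) : ∀ i j count,
    countRevLoopA A B i j count
      = count + ((B.drop j).foldl countRevStepD (A.drop i, 0)).2 := by
  intro i j count
  induction i, j, count using countRevLoopA.induct A B with
  | case1 i j count h hle ih =>
      rw [countRevLoopA, dif_pos h, if_pos hle, ih]
      have hB : B.drop j = B[j] :: B.drop (j + 1) := List.drop_eq_getElem_cons h.2
      have hA : A.drop i = A[i] :: A.drop (i + 1) := List.drop_eq_getElem_cons h.1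
      rw [hB, hA]
      simp only [List.foldl_cons, countRevStepD, List.dropWhile_cons]
      rw [if_pos (by simp only [decide_eq_true_eq]; omega)]
  | case2 i j count h hle ih =>
      rw [countRevLoopA, dif_pos h, if_neg hle, ih]
      have hB : B.drop j = B[j] :: B.drop (j + 1) := List.drop_eq_getElem_cons h.2
      have hA : A.drop i = A[i] :: A.drop (i + 1) := List.drop_eq_getElem_cons h.1
      rw [hB]
      simp only [List.foldl_cons, countRevStepD]
      rw [show (A.drop i).dropWhile (fun x => decide (x ≤ 2 * B[j])) = A.drop i by
        rw [hA, List.dropWhile_cons, if_neg (by simp; omega)]]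
      rw [zero_add, countRev_foldl_acc _ _ ((A.drop i).length : Int)]
      have : ((A.drop i).length : Int) = ((A.length - i : Nat) : Int) := by
        simp [List.length_drop]
      omega
  | case3 i j count h =>
      rw [countRevLoopA, dif_neg h]
      rcases Nat.lt_or_ge i A.length with hi | hi
      · have hj : B.length ≤ j := by omega
        rw [List.drop_eq_nil_of_le hj]; simp
      · rw [List.drop_eq_nil_of_le hi, countRev_foldl_nil]; ring

-- ===== VERDICT (by name: the statement is the Claim_ definition above) =====
theorem count_reverse_spec : Claim_equal_count_reverse := by
  intro A B _
  show count_reverse A B = count_reverse_alt A B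
  rw [count_reverse, countRevLoopA_eq, count_reverse_alt, countRev_fold_reverse]
  simp
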